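-- pv_equiv track=rewrite | github.com/KonstantinData/multi-agent-market-intel-pipeline | src/agents/ag11_locations_sites/agent.py | _select_best_site_location
-- ===== SOURCE A (Python) =====
-- from typing import Any, Dict, List, Optional, Tuple
--
-- def _select_best_site_location(sites: List[Dict[str, str]]) -> Tuple[str, str]:
--     for site in sites:
--         if site.get("site_type") != "hq":
--             continue
--         city = site.get("city") or "n/v"
--         country = site.get("country_region") or "n/v"
--         if city not in (None, "", "n/v") or country not in (None, "", "n/v"):
--             return city, country
--     for site in sites:
--         city = site.get("city") or "n/v"
--         country = site.get("country_region") or "n/v"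
--         if city not in (None, "", "n/v") or country not in (None, "", "n/v"):
--             return city, country
--     return "n/v", "n/v"
-- ===== SOURCE B (Python) =====
-- from typing import Any, Dict, List, Optional, Tuple
--
-- def _select_best_site_location(sites: List[Dict[str, str]]) -> Tuple[str, str]:
--     fallback = None
--     for site in sites:
--         city = site.get("city") or "n/v"
--         country = site.get("country_region") or "n/v"
--         valid = city not in (None, "", "n/v") or country not in (None, "", "n/v")
--         if valid and site.get("site_type") == "hq":
--             return city, country
--         if valid and fallback is None:
--             fallback = (city, country)
--     return fallback if fallback is not None else ("n/v", "n/v")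
-- ===== Notes on version B (the rewrite author's own statement) =====
-- stated objective: simpler
-- what changed: Replaces A's two full passes (HQ pass then any-site pass) with one single pass that returns a valid HQ site immediately and remembers the first valid site as a never-overwritten fallback.
import Mathlib
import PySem

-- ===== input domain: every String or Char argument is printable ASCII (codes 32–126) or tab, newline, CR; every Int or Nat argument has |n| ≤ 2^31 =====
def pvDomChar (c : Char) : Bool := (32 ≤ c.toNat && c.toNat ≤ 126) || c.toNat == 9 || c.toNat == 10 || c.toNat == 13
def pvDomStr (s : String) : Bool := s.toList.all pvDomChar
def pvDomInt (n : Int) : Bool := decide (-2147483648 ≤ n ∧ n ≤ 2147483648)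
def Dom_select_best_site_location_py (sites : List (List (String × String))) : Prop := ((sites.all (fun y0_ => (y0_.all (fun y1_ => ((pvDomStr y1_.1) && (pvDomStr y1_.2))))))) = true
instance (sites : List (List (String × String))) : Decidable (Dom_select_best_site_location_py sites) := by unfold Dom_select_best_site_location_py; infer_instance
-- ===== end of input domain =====

-- B replaces A's two full passes (HQ pass, then any-site pass) with one single pass that
-- returns a valid HQ site immediately and keeps the first valid site as a never-overwritten
-- fallback (objective: simpler).


-- ===== PORT A =====
-- site.get(k) on the association list (first match; Python dicts have unique keys)
def pvGet (site : List (String × String)) (k : String) : Option String :=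
  (PySem.Dict.mk site).get? k
-- `site.get(k) or "n/v"`: None and "" are falsy
def pvOrNV (o : Option String) : String :=
  match o with
  | some s => if s = "" then "n/v" else s
  | none => "n/v"
-- `v not in (None, "", "n/v")` for the (always non-None) defaulted string v
def pvValid (city country : String) : Bool :=
  (city ≠ "" && city ≠ "n/v") || (country ≠ "" && country ≠ "n/v")

-- A's first loop: first valid HQ site
def selA_loop1 : List (List (String × String)) → Option (String × String)
  | [] => none
  | site :: rest =>
    if pvGet site "site_type" ≠ some "hq" then selA_loop1 rest
    else
      let city := pvOrNV (pvGet site "city")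
      let country := pvOrNV (pvGet site "country_region")
      if pvValid city country then some (city, country) else selA_loop1 rest

-- A's second loop: first valid site of any type
def selA_loop2 : List (List (String × String)) → Option (String × String)
  | [] => none
  | site :: rest =>
    let city := pvOrNV (pvGet site "city")
    let country := pvOrNV (pvGet site "country_region")
    if pvValid city country then some (city, country) else selA_loop2 rest

def select_best_site_location_py (sites : List (List (String × String))) : String × String :=
  match selA_loop1 sites with
  | some p => p
  | none =>
    match selA_loop2 sites with
    | some p => p
    | none => ("n/v", "n/v")

-- ===== PORT B =====
-- single pass with a never-overwritten fallback
def selB_loop (fallback : Option (String × String)) : List (List (String × String)) → String × String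
  | [] => fallback.getD ("n/v", "n/v")
  | site :: rest =>
    let city := pvOrNV (pvGet site "city")
    let country := pvOrNV (pvGet site "country_region")
    if pvValid city country && (pvGet site "site_type" == some "hq") then (city, country)
    else if pvValid city country && fallback.isNone then selB_loop (some (city, country)) rest
    else selB_loop fallback rest

def select_best_site_location_py_alt (sites : List (List (String × String))) : String × String :=
  selB_loop none sites

-- ===== PRECONDITION & SPEC =====
def Spec_select_best_site_location_py (sites : List (List (String × String))) (out : String × String) : Prop := out = select_best_site_location_py_alt sites
instance (sites : List (List (String × String))) (out : String × String) : Decidable (Spec_select_best_site_location_py sites out) := by unfold Spec_select_best_site_location_py; infer_instance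

-- ===== CLAIM (what is proved, stated in full; the proofs are below) =====
def Claim_equal_select_best_site_location_py : Prop := ∀ (sites : List (List (String × String))), Dom_select_best_site_location_py sites → Spec_select_best_site_location_py sites (select_best_site_location_py sites)

-- ===== LEMMAS AND PROOFS =====
-- Once a fallback is stored, B returns the first valid HQ site if any, else the fallback.
lemma selB_loop_some (f : String × String) (sites : List (List (String × String))) :
    selB_loop (some f) sites = (selA_loop1 sites).getD f := by
  induction sites with
  | nil => rfl
  | cons site rest ih =>
    simp only [selB_loop, selA_loop1]
    by_cases hq : pvGet site "site_type" = some "hq" <;>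
      by_cases hv : pvValid (pvOrNV (pvGet site "city")) (pvOrNV (pvGet site "country_region")) = true <;>
      simp [hq, hv, ih]

-- With no fallback yet, B equals A's composition of the two loops.
lemma selB_loop_none (sites : List (List (String × String))) :
    selB_loop none sites =
      match selA_loop1 sites with
      | some p => p
      | none =>
        match selA_loop2 sites with
        | some p => p
        | none => ("n/v", "n/v") := by
  induction sites with
  | nil => rfl
  | cons site rest ih =>
    simp only [selB_loop, selA_loop1, selA_loop2]
    by_cases hq : pvGet site "site_type" = some "hq" <;>
      by_cases hv : pvValid (pvOrNV (pvGet site "city")) (pvOrNV (pvGet site "country_region")) = true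
    · simp [hq, hv]
    · simp [hq, hv, ih]
    · -- valid non-HQ site: becomes the fallback; A's loop2 stops here
      simp only [hv]
      simp [selB_loop_some, hq]
      cases selA_loop1 rest <;> simp [Option.getD]
    · simp [hq, hv, ih]

-- ===== VERDICT (by name: the statement is the Claim_ definition above) =====
theorem select_best_site_location_py_spec : Claim_equal_select_best_site_location_py := by
  intro sites _
  unfold Spec_select_best_site_location_py select_best_site_location_py select_best_site_location_py_alt
  rw [selB_loop_none]
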